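-- pv_equiv track=rewrite | github.com/akshayoffice/instructor-test | app.py | clean_header
-- ===== SOURCE A (Python) =====
-- def clean_header(raw_header):
--     """
--     Take a list of header values (some may be None or duplicates)
--     and return a list where:
--       1. non-str or empty entries become "col_<index>"
--       2. duplicate names get suffixes: name, name_1, name_2, …
--     """
--     counts = {}
--     cleaned = []
--     for idx, h in enumerate(raw_header):
--         # Safely coerce non-str to empty and strip whitespace
--         h_str = h.strip() if isinstance(h, str) else ""
--         # Fallback name if header cell is empty
--         base = h_str or f"col_{idx}"
--         # Count duplicates
--         cnt = counts.get(base, 0)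
--         counts[base] = cnt + 1
--
--         # Append suffix if needed
--         if cnt:
--             cleaned.append(f"{base}_{cnt}")
--         else:
--             cleaned.append(base)
--     return cleaned
-- ===== SOURCE B (Python) =====
-- def clean_header(raw_header):
--     # Group-fill scheme: first build an index table mapping each cleaned base
--     # name to the ordered list of positions that produced it, then allocate the
--     # output and fill it group by group, suffixing the k-th later occurrence.
--     groups = {}
--     for i, h in enumerate(raw_header):
--         base = (h.strip() if isinstance(h, str) else "") or f"col_{i}"
--         groups.setdefault(base, []).append(i)
--     result = [None] * len(raw_header)
--     for base, positions in groups.items():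
--         for k, pos in enumerate(positions):
--             result[pos] = base if k == 0 else f"{base}_{k}"
--     return result
-- ===== Notes on version B (the rewrite author's own statement) =====
-- stated objective: alternative
-- what changed: Replaces A's single streaming pass with a running dict counter by a two-phase group-fill: first build an index table mapping each cleaned base name to its ordered list of positions, then allocate the result and fill it group by group, suffixing the k-th later occurrence per group.
import Mathlib
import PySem

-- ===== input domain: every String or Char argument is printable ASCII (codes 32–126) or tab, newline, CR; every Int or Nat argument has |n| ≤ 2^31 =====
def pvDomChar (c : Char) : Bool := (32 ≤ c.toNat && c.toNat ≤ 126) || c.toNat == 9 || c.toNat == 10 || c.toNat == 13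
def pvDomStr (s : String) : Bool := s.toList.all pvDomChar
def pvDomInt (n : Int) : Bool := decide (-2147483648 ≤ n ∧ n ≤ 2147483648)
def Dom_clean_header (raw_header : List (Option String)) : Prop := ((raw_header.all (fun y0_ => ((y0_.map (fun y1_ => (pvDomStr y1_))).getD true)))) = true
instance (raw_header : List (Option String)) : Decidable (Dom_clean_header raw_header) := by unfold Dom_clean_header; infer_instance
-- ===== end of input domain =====

-- B replaces A's single streaming pass with a running dict counter by a two-phase group-fill:
-- build an index table base-name -> ordered positions, then fill a preallocated result group by group.


-- ===== PORT A =====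
-- base-name coercion both Pythons contain verbatim: strip if str else "", then fall back to "col_<idx>"
def pvBase (idx : Int) (h : Option String) : String :=
  let h_str := match h with
    | some s => PySem.Str.strip s
    | none => ""
  if h_str = "" then "col_" ++ PySem.Int.toStr idx else h_str

def clean_header (raw_header : List (Option String)) : List String :=
  ((PySem.List.enumerate raw_header 0).foldl
    (fun (st : PySem.Dict String Int × List String) p =>
      let base := pvBase p.1 p.2
      let cnt := st.1.getD base 0
      let counts := st.1.insert base (cnt + 1)
      (counts, st.2 ++ [if cnt ≠ 0 then base ++ "_" ++ PySem.Int.toStr cnt else base]))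
    (PySem.Dict.empty, [])).2

-- ===== PORT B =====
def clean_header_alt (raw_header : List (Option String)) : List String :=
  -- groups (first pass): groups.setdefault(base, []).append(i)  (= d[k] = d.get(k, []) + [i], Dict.modify);
  -- then result = [None]*n and the group-fill over groups.items: every index is written exactly
  -- once, so the placeholder "" never survives; every stored position is a valid index, so pySetD is exact
  ((PySem.List.enumerate raw_header 0).foldl
      (fun g p => g.modify (pvBase p.1 p.2) [] (fun l => l ++ [p.1]))
      (PySem.Dict.empty : PySem.Dict String (List Int))).items.foldl
    (fun res q =>
      (PySem.List.enumerate q.2 0).foldl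
        (fun r kp => PySem.List.pySetD r kp.2
          (if kp.1 = 0 then q.1 else q.1 ++ "_" ++ PySem.Int.toStr kp.1))
        res)
    (List.replicate raw_header.length "")

-- ===== PRECONDITION & SPEC =====
def Spec_clean_header (raw_header : List (Option String)) (out : List String) : Prop := out = clean_header_alt raw_header
instance (raw_header : List (Option String)) (out : List String) : Decidable (Spec_clean_header raw_header out) := by unfold Spec_clean_header; infer_instance

-- ===== CLAIM (what is proved, stated in full; the proofs are below) =====
def Claim_equal_clean_header : Prop := ∀ (raw_header : List (Option String)), Dom_clean_header raw_header → Spec_clean_header raw_header (clean_header raw_header)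

-- ===== LEMMAS AND PROOFS =====

-- the base name of index i, read off the raw list
def pvG (raw : List (Option String)) (i : Nat) : String := pvBase i (raw.getD i none)

-- A's count of pvG raw j among the earlier base names
def pvCnt (raw : List (Option String)) (j : Nat) : Nat :=
  ((List.range j).filter (fun i => pvG raw i == pvG raw j)).length

-- the canonical result both ports compute
def pvCanon (raw : List (Option String)) : List String :=
  (List.range raw.length).map (fun j =>
    if pvCnt raw j = 0 then pvG raw j
    else pvG raw j ++ "_" ++ PySem.Int.toStr (pvCnt raw j))

-- ordered positions of base name b (B's groups[b])
def pvPos (raw : List (Option String)) (b : String) : List Int :=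
  List.map (fun (i : Nat) => (i : Int)) ((List.range raw.length).filter (fun i => pvG raw i == b))

-- ---------- shared: enumerate as a map over the index range ----------

theorem pvEnum_eq (raw : List (Option String)) :
    PySem.List.enumerate raw 0
      = (List.range raw.length).map (fun (i : Nat) => ((i : Int), raw.getD i none)) := by
  rw [PySem.List.enumerate_eq_map_pyRange raw none, PySem.List.pyRange_one]
  simp only [PySem.List.len_eq, Int.sub_zero, Int.toNat_natCast, List.map_map]
  apply List.map_congr_left
  intro i _
  simp

-- ---------- A side ----------

-- canonical naming of the base-name list bs after already-seen prefix p
def pvF (p : List String) : List String → List String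
  | [] => []
  | b :: t =>
      (if (p.count b : Int) ≠ 0 then b ++ "_" ++ PySem.Int.toStr (p.count b : Int) else b)
        :: pvF (p ++ [b]) t

theorem pvA_loop (bs : List (Int × Option String)) :
    ∀ (d : PySem.Dict String Int) (p : List String) (acc : List String),
    (∀ b, d.getD b 0 = (p.count b : Int)) →
    (bs.foldl
      (fun (st : PySem.Dict String Int × List String) q =>
        let base := pvBase q.1 q.2
        let cnt := st.1.getD base 0
        let counts := st.1.insert base (cnt + 1)
        (counts, st.2 ++ [if cnt ≠ 0 then base ++ "_" ++ PySem.Int.toStr cnt else base]))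
      (d, acc)).2 = acc ++ pvF p (bs.map (fun q => pvBase q.1 q.2)) := by
  induction bs with
  | nil => intro d p acc _; simp [pvF]
  | cons q t ih =>
      intro d p acc hd
      simp only [List.foldl_cons, List.map_cons, pvF]
      rw [ih (d.insert (pvBase q.1 q.2) (d.getD (pvBase q.1 q.2) 0 + 1)) (p ++ [pvBase q.1 q.2]) _ ?_]
      · rw [hd (pvBase q.1 q.2)]; simp
      · intro b'
        rw [PySem.Dict.getD_insert, hd b', hd (pvBase q.1 q.2)]
        by_cases h : b' = pvBase q.1 q.2
        · subst h; simp
        · simp [h, Ne.symm h]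

-- pvF, element-wise: position j gets the count of its base in prefix ++ earlier bases
theorem pvF_eq (bs : List String) : ∀ (p : List String),
    pvF p bs = (List.range bs.length).map (fun j =>
      if (p ++ bs.take j).count (bs.getD j "") = 0 then bs.getD j ""
      else bs.getD j "" ++ "_" ++ PySem.Int.toStr ((p ++ bs.take j).count (bs.getD j "") : Int)) := by
  induction bs with
  | nil => intro p; simp [pvF]
  | cons b t ih =>
      intro p
      simp only [pvF, List.length_cons, List.range_succ_eq_map, List.map_cons, List.map_map]
      congr 1
      · simp only [List.getD_cons_zero, List.take_zero, List.append_nil]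
        by_cases h : p.count b = 0 <;> simp [h]
      · rw [ih (p ++ [b])]
        apply List.map_congr_left
        intro j _
        simp [List.append_assoc]

theorem count_take_eq (raw : List (Option String)) (bs : List String)
    (hbs : bs = (PySem.List.enumerate raw 0).map (fun q => pvBase q.1 q.2)) (j : Nat)
    (hj : j < raw.length) :
    (bs.take j).count (bs.getD j "") = pvCnt raw j ∧ bs.getD j "" = pvG raw j := by
  have hb : bs = (List.range raw.length).map (pvG raw) := by
    rw [hbs, pvEnum_eq, List.map_map]; rfl
  have hget : bs.getD j "" = pvG raw j := by
    simp [hb, List.getD_eq_getElem?_getD, hj]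
  refine ⟨?_, hget⟩
  have htake : bs.take j = (List.range j).map (pvG raw) := by
    rw [hb, ← List.map_take, List.take_range, min_eq_left (by omega : j ≤ raw.length)]
  rw [htake, hget, pvCnt, List.count_eq_countP, List.countP_map, List.countP_eq_length_filter]
  rfl

theorem clean_header_eq_canon (raw : List (Option String)) :
    clean_header raw = pvCanon raw := by
  unfold clean_header
  rw [pvA_loop _ PySem.Dict.empty [] [] (by intro b; simp)]
  rw [pvF_eq, List.nil_append]
  have hlen : ((PySem.List.enumerate raw 0).map (fun q => pvBase q.1 q.2)).length = raw.length := by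
    simp [PySem.List.length_enumerate]
  unfold pvCanon
  rw [hlen]
  apply List.map_congr_left
  intro j hj
  have hj' : j < raw.length := List.mem_range.mp hj
  obtain ⟨hc, hg⟩ := count_take_eq raw _ rfl j hj'
  rw [hg] at hc
  simp only [List.nil_append, hg, hc]

-- ---------- B side ----------

-- the inner group fill: writes to positions not in ps leave r[j]? untouched
theorem inner_other {v : Int → String} (ps : List Int) (hnn : ∀ x ∈ ps, 0 ≤ x) :
    ∀ (s : Int) (r : List String) (j : Nat), (j : Int) ∉ ps →
    ((PySem.List.enumerate ps s).foldl
      (fun r kp => PySem.List.pySetD r kp.2 (v kp.1)) r)[j]? = r[j]? := by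
  induction ps with
  | nil => intro s r j _; simp [PySem.List.enumerate_nil]
  | cons p t ih =>
      intro s r j hj
      rw [PySem.List.enumerate_cons]
      simp only [List.foldl_cons]
      rw [ih (fun x hx => hnn x (List.mem_cons_of_mem _ hx)) _ _ _
        (fun h => hj (List.mem_cons_of_mem _ h))]
      rw [PySem.List.pySetD_of_nonneg r (v s) (hnn p (List.mem_cons_self ..))]
      apply List.getElem?_set_ne
      intro h
      apply hj
      have hp0 := hnn p (List.mem_cons_self ..)
      have : p = (j : Int) := by omega
      rw [this]
      exact List.mem_cons_self ..

theorem inner_len {v : Int → String} (ps : List Int) :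
    ∀ (s : Int) (r : List String),
    ((PySem.List.enumerate ps s).foldl
      (fun r kp => PySem.List.pySetD r kp.2 (v kp.1)) r).length = r.length := by
  induction ps with
  | nil => intro s r; simp [PySem.List.enumerate_nil]
  | cons p t ih =>
      intro s r
      rw [PySem.List.enumerate_cons]
      simp only [List.foldl_cons]
      rw [ih, PySem.List.length_pySetD]

theorem inner_hit {v : Int → String} (ps : List Int) (hnn : ∀ x ∈ ps, 0 ≤ x)
    (hnd : ps.Nodup) : ∀ (s : Int) (r : List String) (k j : Nat),
    ps[k]? = some (j : Int) → j < r.length →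
    ((PySem.List.enumerate ps s).foldl
      (fun r kp => PySem.List.pySetD r kp.2 (v kp.1)) r)[j]? = some (v (s + k)) := by
  induction ps with
  | nil => intro s r k j h _; simp at h
  | cons p t ih =>
      intro s r k j hk hj
      rw [PySem.List.enumerate_cons]
      simp only [List.foldl_cons]
      match k, hk with
      | 0, hk =>
          have hp : p = (j : Int) := by simpa using hk
          subst hp
          rw [inner_other t (fun x hx => hnn x (List.mem_cons_of_mem _ hx)) _ _ _
            (List.nodup_cons.mp hnd).1]
          rw [PySem.List.pySetD_of_nonneg r (v s) (hnn _ (List.mem_cons_self ..))]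
          simp [hj]
      | (k' + 1), hk =>
          have ht : t[k']? = some (j : Int) := by simpa using hk
          have harg : s + 1 + (k' : Int) = s + ((k' + 1 : Nat) : Int) := by push_cast; ring
          rw [ih (fun x hx => hnn x (List.mem_cons_of_mem _ hx)) (List.nodup_cons.mp hnd).2
            _ _ _ _ ht
            (by rw [PySem.List.pySetD_of_nonneg r (v s) (hnn _ (List.mem_cons_self ..))]
                simpa using hj),
            harg]

-- properties of the position list of a base
theorem pvPos_nonneg (raw : List (Option String)) (b : String) :
    ∀ x ∈ pvPos raw b, 0 ≤ x := by
  intro x hx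
  obtain ⟨i, _, rfl⟩ := List.mem_map.mp hx
  exact Int.natCast_nonneg i

theorem pvPos_nodup (raw : List (Option String)) (b : String) : (pvPos raw b).Nodup :=
  List.Nodup.map (fun a b h => by exact_mod_cast h)
    (List.Nodup.filter _ List.nodup_range)

theorem mem_pvPos (raw : List (Option String)) (b : String) (j : Nat) :
    (j : Int) ∈ pvPos raw b ↔ j < raw.length ∧ pvG raw j = b := by
  unfold pvPos
  rw [List.mem_map]
  constructor
  · rintro ⟨i, hi, hij⟩
    have : i = j := by exact_mod_cast hij
    subst this
    have := List.mem_filter.mp hi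
    exact ⟨List.mem_range.mp this.1, by simpa using this.2⟩
  · rintro ⟨h1, h2⟩
    exact ⟨j, List.mem_filter.mpr ⟨List.mem_range.mpr h1, by simpa using h2⟩, rfl⟩

theorem pvPos_hit (raw : List (Option String)) (j : Nat) (hj : j < raw.length) :
    (pvPos raw (pvG raw j))[pvCnt raw j]? = some (j : Int) := by
  unfold pvPos pvCnt
  rw [List.getElem?_map]
  have hsplit : List.range raw.length
      = List.range j ++ (List.range (raw.length - j)).map (j + ·) := by
    rw [← List.range_add]; congr 1; omega
  have hcons : (List.range (raw.length - j)).map (j + ·)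
      = j :: (List.range (raw.length - j - 1)).map (j + 1 + ·) := by
    have h1 : raw.length - j = (raw.length - j - 1) + 1 := by omega
    rw [h1, List.range_succ_eq_map, List.map_cons, List.map_map]
    congr 1
    apply List.map_congr_left
    intro x _
    simp only [Function.comp_apply]
    omega
  rw [hsplit, List.filter_append, hcons, List.filter_cons_of_pos (by simp)]
  rw [List.getElem?_append_right (le_refl _), Nat.sub_self]
  simp

-- rewrite the keyed grouping fold as a fold over (key, value) pairs
theorem pvFold_pairs (l : List (Int × Option String)) :
    ∀ (d : PySem.Dict String (List Int)),
    l.foldl (fun g p => g.modify (pvBase p.1 p.2) [] (fun s => s ++ [p.1])) d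
      = (l.map (fun p => (pvBase p.1 p.2, p.1))).foldl
          (fun g q => g.modify q.1 [] (fun s => s ++ [q.2])) d := by
  induction l with
  | nil => intro d; rfl
  | cons p t ih => intro d; simp only [List.map_cons, List.foldl_cons]; exact ih _

-- the first pass builds exactly the position table
theorem groups_eq (raw : List (Option String)) (b : String) :
    ((PySem.List.enumerate raw 0).foldl
      (fun g p => g.modify (pvBase p.1 p.2) [] (fun l => l ++ [p.1]))
      (PySem.Dict.empty : PySem.Dict String (List Int))).getD b [] = pvPos raw b := by
  rw [pvFold_pairs, PySem.Dict.getD_foldl_modify_append, PySem.Dict.getD_empty,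
    List.nil_append, pvEnum_eq, List.map_map, List.filter_map, List.map_map]
  simp only [Function.comp_def]
  rfl

theorem groups_keys (raw : List (Option String)) :
    ((PySem.List.enumerate raw 0).foldl
      (fun g p => g.modify (pvBase p.1 p.2) [] (fun l => l ++ [p.1]))
      (PySem.Dict.empty : PySem.Dict String (List Int))).keys
      = PySem.Set.ofList ((List.range raw.length).map (pvG raw)) := by
  rw [PySem.Dict.keys_foldl_modify_key (PySem.List.enumerate raw 0)
    (fun p => pvBase p.1 p.2) [] (fun _ p => fun s => s ++ [p.1]) PySem.Dict.empty]
  rw [PySem.Dict.keys_empty, PySem.Set.update_nil_left, pvEnum_eq, List.map_map]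
  rfl

theorem groups_keys_nodup (raw : List (Option String)) :
    ((PySem.List.enumerate raw 0).foldl
      (fun g p => g.modify (pvBase p.1 p.2) [] (fun l => l ++ [p.1]))
      (PySem.Dict.empty : PySem.Dict String (List Int))).keys.Nodup :=
  PySem.Dict.nodup_keys_foldl_modify_key (PySem.List.enumerate raw 0)
    (fun p => pvBase p.1 p.2) [] (fun _ p => fun s => s ++ [p.1]) PySem.Dict.empty
    (by simp [PySem.Dict.keys_empty])

-- outer fold over the groups, element-wise
theorem outer_fold (raw : List (Option String)) (K : List String) :
    ∀ (r : List String), r.length = raw.length → ∀ (j : Nat), j < raw.length →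
    ((K.map (fun b => (b, pvPos raw b))).foldl
      (fun res q =>
        (PySem.List.enumerate q.2 0).foldl
          (fun r kp => PySem.List.pySetD r kp.2
            (if kp.1 = 0 then q.1 else q.1 ++ "_" ++ PySem.Int.toStr kp.1)) res)
      r)[j]?
    = if pvG raw j ∈ K
      then some (if ((pvCnt raw j : Nat) : Int) = 0 then pvG raw j
                 else pvG raw j ++ "_" ++ PySem.Int.toStr (pvCnt raw j))
      else r[j]? := by
  induction K with
  | nil => intro r _ j _; simp
  | cons b L ih =>
      intro r hr j hj
      simp only [List.map_cons, List.foldl_cons]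
      rw [ih _ (by
        rw [inner_len (v := fun k => if k = 0 then b else b ++ "_" ++ PySem.Int.toStr k)
          (pvPos raw b) 0 r]
        exact hr) j hj]
      by_cases hb : pvG raw j = b
      · subst hb
        simp only [List.mem_cons, true_or, if_pos]
        by_cases hmem : pvG raw j ∈ L
        · simp [hmem]
        · rw [if_neg hmem]
          rw [inner_hit (v := fun k => if k = 0 then pvG raw j
                else pvG raw j ++ "_" ++ PySem.Int.toStr k)
            (pvPos raw (pvG raw j)) (pvPos_nonneg raw _) (pvPos_nodup raw _) 0 r
            (pvCnt raw j) j (pvPos_hit raw j hj) (by rw [hr]; exact hj)]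
          simp
      · have hnot : (j : Int) ∉ pvPos raw b := fun h => hb ((mem_pvPos raw b j).mp h).2
        rw [inner_other (v := fun k => if k = 0 then b else b ++ "_" ++ PySem.Int.toStr k)
          (pvPos raw b) (pvPos_nonneg raw b) 0 r j hnot]
        by_cases hmem : pvG raw j ∈ L
        · simp [hmem]
        · simp [hmem, hb]

theorem outer_len (items : List (String × List Int)) :
    ∀ (r : List String),
    (items.foldl
      (fun res q =>
        (PySem.List.enumerate q.2 0).foldl
          (fun r kp => PySem.List.pySetD r kp.2
            (if kp.1 = 0 then q.1 else q.1 ++ "_" ++ PySem.Int.toStr kp.1)) res)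
      r).length = r.length := by
  induction items with
  | nil => intro r; simp
  | cons q t ih =>
      intro r
      simp only [List.foldl_cons]
      rw [ih]
      exact inner_len (v := fun k => if k = 0 then q.1 else q.1 ++ "_" ++ PySem.Int.toStr k) q.2 0 r

theorem groups_items (raw : List (Option String)) :
    ((PySem.List.enumerate raw 0).foldl
      (fun g p => g.modify (pvBase p.1 p.2) [] (fun l => l ++ [p.1]))
      (PySem.Dict.empty : PySem.Dict String (List Int))).items
    = ((PySem.List.enumerate raw 0).foldl
      (fun g p => g.modify (pvBase p.1 p.2) [] (fun l => l ++ [p.1]))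
      (PySem.Dict.empty : PySem.Dict String (List Int))).keys.map (fun b => (b, pvPos raw b)) := by
  rw [PySem.Dict.items_eq_map_keys _ (groups_keys_nodup raw) []]
  apply List.map_congr_left
  intro b _
  rw [Prod.mk.injEq]
  exact ⟨rfl, groups_eq raw b⟩

theorem clean_header_alt_eq_canon (raw : List (Option String)) :
    clean_header_alt raw = pvCanon raw := by
  unfold clean_header_alt
  rw [groups_items]
  apply List.ext_getElem?
  intro j
  by_cases hj : j < raw.length
  · rw [outer_fold raw _ _ (by simp) j hj]
    have hmem : pvG raw j ∈ ((PySem.List.enumerate raw 0).foldl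
        (fun g p => g.modify (pvBase p.1 p.2) [] (fun l => l ++ [p.1]))
        (PySem.Dict.empty : PySem.Dict String (List Int))).keys := by
      rw [groups_keys, PySem.Set.mem_ofList]
      exact List.mem_map_of_mem (List.mem_range.mpr hj)
    rw [if_pos hmem]
    unfold pvCanon
    rw [List.getElem?_map]
    simp only [List.getElem?_range, hj, Option.map_some]
    by_cases hc : pvCnt raw j = 0
    · simp [hc]
    · simp [hc]
  · have h1 : (pvCanon raw).length = raw.length := by simp [pvCanon]
    have h2 := outer_len ((((PySem.List.enumerate raw 0).foldl
        (fun g p => g.modify (pvBase p.1 p.2) [] (fun l => l ++ [p.1]))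
        (PySem.Dict.empty : PySem.Dict String (List Int))).keys).map (fun b => (b, pvPos raw b)))
      (List.replicate raw.length "")
    rw [List.getElem?_eq_none (by rw [h2]; simpa using Nat.le_of_not_lt hj),
      List.getElem?_eq_none (by rw [h1]; exact Nat.le_of_not_lt hj)]

-- ===== VERDICT (by name: the statement is the Claim_ definition above) =====
theorem clean_header_spec : Claim_equal_clean_header := by
  intro raw_header _
  unfold Spec_clean_header
  rw [clean_header_eq_canon, clean_header_alt_eq_canon]
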